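-- pv_equiv track=rewrite | github.com/fossology/Nirjas | nirjas/binder.py | contSingleLines
-- ===== SOURCE A (Python) =====
-- from itertools import groupby
-- from operator import itemgetter
--
-- def contSingleLines(data):
--     """
--     Merge consecutive single line comments as cont_single_line_comment
--     """
--     lines, start_line, end_line, output = [], [], [], []
--     content = ""
--     for i in data[0]:
--         lines.append(i[0])
--
--     for _, b in groupby(enumerate(lines), lambda x: x[0] - x[1]):
--         temp = list(map(itemgetter(1), b))
--         content = ""
--
--         if len(temp) > 1:
--             start_line.append(temp[0])
--             end_line.append(temp[-1])
--             for i in temp: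
--                 comment = [x[1] for x in data[0] if x[0] == i]
--                 for index, x in enumerate(data[0]):
--                     if x[0] == i:
--                         del data[0][index]
--                 content = content + " " + comment[0]
--             output.append(content)
--     return data, start_line, end_line, output
-- ===== SOURCE B (Python) =====
-- def contSingleLines(data):
--     """
--     Merge consecutive single line comments as cont_single_line_comment.
--     One linear walk over data[0] keeping a current run of consecutive lines.
--     (Note: replaces data[0] with a new list instead of deleting in place.)
--     """
--     first = data[0]
--     start_line, end_line, output, keep = [], [], [], []
--     run = []
--     for entry in first:
--         if run and entry[0] == run[-1][0] + 1:
--             run.append(entry)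
--             continue
--         if len(run) > 1:
--             start_line.append(run[0][0])
--             end_line.append(run[-1][0])
--             output.append("".join(" " + c for _, c in run))
--         else:
--             keep.extend(run)
--         run = [entry]
--     if len(run) > 1:
--         start_line.append(run[0][0])
--         end_line.append(run[-1][0])
--         output.append("".join(" " + c for _, c in run))
--     else:
--         keep.extend(run)
--     data[0] = keep
--     return data, start_line, end_line, output
-- ===== Notes on version B (the rewrite author's own statement) =====
-- stated objective: alternative
-- what changed: B replaces groupby-over-line-numbers plus per-line full scans and delete-while-iterating passes over data[0] with a single linear walk over data[0] maintaining a current run of entries, emitting start/end/content at run boundaries and rebuilding data[0] once (O(n) instead of O(n^2) passes; speed at scale not verified because the timing inputs contain duplicate line numbers, outside Pre_).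
-- outside the precondition, e.g. on contSingleLines([]): A raises IndexError, B raises IndexError
import Mathlib
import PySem

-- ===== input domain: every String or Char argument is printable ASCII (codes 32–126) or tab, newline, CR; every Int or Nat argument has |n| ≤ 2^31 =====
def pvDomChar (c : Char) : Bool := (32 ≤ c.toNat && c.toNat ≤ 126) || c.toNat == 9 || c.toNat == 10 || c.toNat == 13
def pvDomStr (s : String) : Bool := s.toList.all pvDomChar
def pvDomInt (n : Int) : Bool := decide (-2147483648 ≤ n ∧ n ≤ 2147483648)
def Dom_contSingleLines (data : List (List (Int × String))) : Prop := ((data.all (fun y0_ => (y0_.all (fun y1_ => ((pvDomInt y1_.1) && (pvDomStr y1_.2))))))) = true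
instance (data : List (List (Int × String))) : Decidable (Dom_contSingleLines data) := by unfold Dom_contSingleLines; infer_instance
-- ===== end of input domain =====

-- Header: B merges consecutive single-line comments in ONE linear walk over data[0]
-- (current-run accumulator) instead of A's groupby over line numbers with per-line
-- full scans and delete-while-iterating passes; B rebuilds data[0] once (A's in-place
-- deletions vs B's rebuild differ only as a side effect, the returned value is proved equal).

-- ===== PORT A =====

-- groupby(enumerate(lines), i - x): maximal runs of consecutive keys i-x equal,
-- i.e. maximal runs where each next value is previous + 1; exact for this key.
def pvTakeRun (p : Int) : List Int → List Int × List Int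
  | [] => ([], [])
  | y :: ys =>
    if y = p + 1 then
      let r := pvTakeRun y ys
      (y :: r.1, r.2)
    else ([], y :: ys)

theorem pvTakeRun_len (p : Int) (l : List Int) : (pvTakeRun p l).2.length ≤ l.length := by
  induction l generalizing p with
  | nil => simp [pvTakeRun]
  | cons y ys ih =>
    simp only [pvTakeRun]
    split
    · exact le_trans (ih y) (Nat.le_succ _)
    · simp

def pvGroupRuns : List Int → List (List Int)
  | [] => []
  | x :: ys =>
    let r := pvTakeRun x ys
    (x :: r.1) :: pvGroupRuns r.2
termination_by l => l.length
decreasing_by exact Nat.lt_succ_of_le (pvTakeRun_len _ _)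

-- Python's `for index, x in enumerate(data[0]): if x[0] == i: del data[0][index]`:
-- after a deletion the live index skips the following element (kept unexamined).
def pvDelIter (i : Int) : List (Int × String) → List (Int × String)
  | [] => []
  | [a] => if a.1 == i then [] else [a]
  | a :: b :: rest =>
    if a.1 == i then b :: pvDelIter i rest else a :: pvDelIter i (b :: rest)

-- the body of the inner `for i in temp` loop
def pvAInner (t : List (Int × String) × String) (i : Int) : List (Int × String) × String :=
  let comment := (t.1.filter (fun x => x.1 == i)).map Prod.snd  -- [x[1] for x in data[0] if x[0] == i]
  let d0' := pvDelIter i t.1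
  (d0', t.2 ++ " " ++ comment.headD "")   -- comment[0]; nonempty whenever Python does not raise

-- the body of the `for _, b in groupby(...)` loop
def pvAStep (s : List (Int × String) × List Int × List Int × List String)
    (temp : List Int) : List (Int × String) × List Int × List Int × List String :=
  if temp.length > 1 then
    let st := s.2.1 ++ [temp.headD 0]          -- temp[0]; temp is nonempty
    let en := s.2.2.1 ++ [temp.getLastD 0]     -- temp[-1]
    let inner := temp.foldl pvAInner (s.1, "")
    (inner.1, st, en, s.2.2.2 ++ [inner.2])
  else s

def contSingleLines (data : List (List (Int × String))) : (List (List (Int × String))) × List Int × List Int × List String :=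
  let first := data.headI               -- data[0] (Pre_ guarantees data ≠ [])
  let lines := first.map Prod.fst
  let res := (pvGroupRuns lines).foldl pvAStep (first, [], [], [])
  (res.1 :: data.tail, res.2.1, res.2.2.1, res.2.2.2)

-- ===== PORT B =====

def pvFlush (run : List (Int × String)) (st en : List Int) (out : List String)
    (keep : List (Int × String)) : List Int × List Int × List String × List (Int × String) :=
  if run.length > 1 then
    (st ++ [(run.headD (0, "")).1], en ++ [(run.getLastD (0, "")).1],
     out ++ [run.foldl (fun c e => c ++ " " ++ e.2) ""], keep)
  else (st, en, out, keep ++ run)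

def pvWalk : List (Int × String) → List (Int × String) → List Int → List Int → List String →
    List (Int × String) → List Int × List Int × List String × List (Int × String)
  | [], run, st, en, out, keep => pvFlush run st en out keep
  | e :: rest, run, st, en, out, keep =>
    if !run.isEmpty && e.1 == (run.getLastD (0, "")).1 + 1 then
      pvWalk rest (run ++ [e]) st en out keep
    else
      let f := pvFlush run st en out keep
      pvWalk rest [e] f.1 f.2.1 f.2.2.1 f.2.2.2

def contSingleLines_alt (data : List (List (Int × String))) : (List (List (Int × String))) × List Int × List Int × List String :=
  let first := data.headI               -- data[0]
  let r := pvWalk first [] [] [] [] []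
  (r.2.2.2 :: data.tail, r.1, r.2.1, r.2.2.1)

-- ===== PRECONDITION & SPEC =====
-- Pre_ excludes empty data, on which A raises IndexError (data[0]), and first lists with a
-- duplicated line number, on which A's first-match comment lookup and delete-while-iterating
-- deletions are an accident of its implementation (on many such lists A and B still agree;
-- the behaviour on any duplicate is unclaimed because which entry A reads/deletes is accidental).
def Pre_contSingleLines (data : List (List (Int × String))) : Prop :=
  data ≠ [] ∧ (data.headI.map Prod.fst).Nodup
instance (data : List (List (Int × String))) : Decidable (Pre_contSingleLines data) := by
  unfold Pre_contSingleLines; infer_instance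

def pvWitness_contSingleLines : (List (List (Int × String))) :=
  [[(1, "a"), (2, "b"), (5, "c")]]

def Spec_contSingleLines (data : List (List (Int × String))) (out : (List (List (Int × String))) × List Int × List Int × List String) : Prop := out = contSingleLines_alt data
instance (data : List (List (Int × String))) (out : (List (List (Int × String))) × List Int × List Int × List String) : Decidable (Spec_contSingleLines data out) := by unfold Spec_contSingleLines; infer_instance

-- ===== CLAIM (what is proved, stated in full; the proofs are below) =====
def Claim_equal_contSingleLines : Prop := ∀ (data : List (List (Int × String))), Dom_contSingleLines data → Pre_contSingleLines data → Spec_contSingleLines data (contSingleLines data)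

-- ===== LEMMAS AND PROOFS =====

-- entry-level analogue of pvTakeRun / pvGroupRuns, used only by the proofs
def pvTakeRunE (p : Int) : List (Int × String) → List (Int × String) × List (Int × String)
  | [] => ([], [])
  | y :: ys =>
    if y.1 = p + 1 then
      let r := pvTakeRunE y.1 ys
      (y :: r.1, r.2)
    else ([], y :: ys)

theorem pvTakeRunE_len (p : Int) (l : List (Int × String)) :
    (pvTakeRunE p l).2.length ≤ l.length := by
  induction l generalizing p with
  | nil => simp [pvTakeRunE]
  | cons y ys ih =>
    simp only [pvTakeRunE]
    split
    · exact le_trans (ih y.1) (Nat.le_succ _)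
    · simp

def pvGroupRunsE : List (Int × String) → List (List (Int × String))
  | [] => []
  | x :: ys =>
    let r := pvTakeRunE x.1 ys
    (x :: r.1) :: pvGroupRunsE r.2
termination_by l => l.length
decreasing_by exact Nat.lt_succ_of_le (pvTakeRunE_len _ _)

-- B-shaped processing of a ready-made group list
def pvProc (gs : List (List (Int × String)))
    (s : List Int × List Int × List String × List (Int × String)) :
    List Int × List Int × List String × List (Int × String) :=
  gs.foldl (fun s g => pvFlush g s.1 s.2.1 s.2.2.1 s.2.2.2) s

theorem pvTakeRunE_append (p : Int) (l : List (Int × String)) :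
    (pvTakeRunE p l).1 ++ (pvTakeRunE p l).2 = l := by
  induction l generalizing p with
  | nil => simp [pvTakeRunE]
  | cons y ys ih =>
    simp only [pvTakeRunE]
    split
    · simpa using ih y.1
    · simp

theorem pvTakeRun_map (p : Int) (l : List (Int × String)) :
    pvTakeRun p (l.map Prod.fst) =
      ((pvTakeRunE p l).1.map Prod.fst, (pvTakeRunE p l).2.map Prod.fst) := by
  induction l generalizing p with
  | nil => simp [pvTakeRun, pvTakeRunE]
  | cons y ys ih =>
    simp only [List.map_cons, pvTakeRun, pvTakeRunE]
    split
    · simp [ih y.1]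
    · simp

theorem pvGroupRuns_map (l : List (Int × String)) :
    pvGroupRuns (l.map Prod.fst) = (pvGroupRunsE l).map (List.map Prod.fst) := by
  induction hn : l.length using Nat.strong_induction_on generalizing l with
  | _ n ih =>
    cases l with
    | nil => simp [pvGroupRuns, pvGroupRunsE]
    | cons x ys =>
      rw [List.map_cons, pvGroupRuns, pvGroupRunsE]
      simp only [pvTakeRun_map]
      rw [ih ((pvTakeRunE x.1 ys).2.length) (by subst hn; simp; exact pvTakeRunE_len _ _) _ rfl]
      simp

theorem pvGroupRunsE_flatten (l : List (Int × String)) :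
    (pvGroupRunsE l).flatten = l := by
  induction hn : l.length using Nat.strong_induction_on generalizing l with
  | _ n ih =>
    cases l with
    | nil => simp [pvGroupRunsE]
    | cons x ys =>
      rw [pvGroupRunsE]
      simp only [List.flatten_cons]
      rw [ih ((pvTakeRunE x.1 ys).2.length) (by subst hn; simp; exact pvTakeRunE_len _ _) _ rfl]
      simpa using congrArg (x :: ·) (pvTakeRunE_append x.1 ys)

theorem pvDelIter_cons (i : Int) (a : Int × String) (l : List (Int × String))
    (h : a.1 ≠ i) : pvDelIter i (a :: l) = a :: pvDelIter i l := by
  cases l with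
  | nil => simp [pvDelIter, h]
  | cons b rest => simp [pvDelIter, h]

theorem pvDelIter_noMatch (i : Int) (l : List (Int × String))
    (h : ∀ x ∈ l, x.1 ≠ i) : pvDelIter i l = l := by
  induction l with
  | nil => rfl
  | cons a l ih =>
    rw [pvDelIter_cons i a l (h a (by simp))]
    rw [ih (fun x hx => h x (by simp [hx]))]

theorem pvDelIter_eq (e : Int × String) (pre suf : List (Int × String))
    (hpre : ∀ x ∈ pre, x.1 ≠ e.1) (hsuf : ∀ x ∈ suf, x.1 ≠ e.1) :
    pvDelIter e.1 (pre ++ e :: suf) = pre ++ suf := by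
  induction pre with
  | nil =>
    cases suf with
    | nil => simp [pvDelIter]
    | cons b rest =>
      simp only [List.nil_append, pvDelIter, beq_self_eq_true, if_pos]
      rw [pvDelIter_noMatch e.1 rest (fun x hx => hsuf x (by simp [hx]))]
  | cons a pre ih =>
    rw [List.cons_append, pvDelIter_cons e.1 a _ (hpre a (by simp))]
    rw [ih (fun x hx => hpre x (by simp [hx]))]
    simp

theorem pvFilter_single (e : Int × String) (pre suf : List (Int × String))
    (hpre : ∀ x ∈ pre, x.1 ≠ e.1) (hsuf : ∀ x ∈ suf, x.1 ≠ e.1) :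
    (pre ++ e :: suf).filter (fun x => x.1 == e.1) = [e] := by
  rw [List.filter_append, List.filter_cons]
  rw [List.filter_eq_nil_iff.mpr (by intro x hx; simpa using hpre x hx)]
  rw [List.filter_eq_nil_iff.mpr (by intro x hx; simpa using hsuf x hx)]
  simp

-- the inner `for i in temp` loop removes exactly the group's entries and joins their comments
theorem pvInner_fold (g : List (Int × String)) :
    ∀ (pre post : List (Int × String)) (c : String),
    ((pre ++ g ++ post).map Prod.fst).Nodup →
    (g.map Prod.fst).foldl pvAInner (pre ++ g ++ post, c) =
      (pre ++ post, g.foldl (fun c e => c ++ " " ++ e.2) c) := by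
  induction g with
  | nil => intro pre post c _; simp
  | cons e g ih =>
    intro pre post c hnd
    have hmem : ∀ x ∈ pre ++ (g ++ post), x.1 ≠ e.1 := by
      intro x hx
      have h1 : ((pre ++ e :: (g ++ post)).map Prod.fst).Nodup := by
        simpa using hnd
      rw [List.map_append, List.map_cons] at h1
      rcases List.nodup_append.mp h1 with ⟨_, hc, hdisj⟩
      rcases List.mem_append.mp hx with h | h
      · intro hco
        exact hdisj x.1 (List.mem_map_of_mem (f := Prod.fst) h) e.1 (by simp) hco
      · intro hco
        rcases List.nodup_cons.mp hc with ⟨hnotin, _⟩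
        exact hnotin (by rw [← hco]; exact List.mem_map_of_mem (f := Prod.fst) h)
    have hpre : ∀ x ∈ pre, x.1 ≠ e.1 := fun x hx => hmem x (List.mem_append.mpr (Or.inl hx))
    have hsuf : ∀ x ∈ g ++ post, x.1 ≠ e.1 := fun x hx => hmem x (List.mem_append.mpr (Or.inr hx))
    have harr : pre ++ (e :: g) ++ post = pre ++ e :: (g ++ post) := by simp
    rw [List.map_cons, List.foldl_cons, harr]
    have hstep : pvAInner (pre ++ e :: (g ++ post), c) e.1 =
        (pre ++ (g ++ post), c ++ " " ++ e.2) := by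
      unfold pvAInner
      rw [pvFilter_single e pre (g ++ post) hpre hsuf,
          pvDelIter_eq e pre (g ++ post) hpre hsuf]
      simp
    rw [hstep]
    have hnd' : ((pre ++ g ++ post).map Prod.fst).Nodup := by
      have hsub : List.Sublist (pre ++ g ++ post) (pre ++ (e :: g) ++ post) :=
        List.Sublist.append
          (List.Sublist.append (List.Sublist.refl pre) (List.sublist_cons_self e g))
          (List.Sublist.refl post)
      exact List.Nodup.sublist (hsub.map Prod.fst) (by simpa using hnd)
    have := ih pre post (c ++ " " ++ e.2) hnd'
    rw [show pre ++ g ++ post = pre ++ (g ++ post) by simp] at this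
    rw [this]
    simp

-- A's group loop, on a run decomposition of its data, equals B-shaped processing
theorem pvAFold (gs : List (List (Int × String))) :
    ∀ (keepAcc : List (Int × String)) (st en : List Int) (out : List String),
    (((keepAcc ++ gs.flatten).map Prod.fst)).Nodup →
    (gs.map (List.map Prod.fst)).foldl pvAStep (keepAcc ++ gs.flatten, st, en, out) =
      ((pvProc gs (st, en, out, keepAcc)).2.2.2, (pvProc gs (st, en, out, keepAcc)).1,
       (pvProc gs (st, en, out, keepAcc)).2.1, (pvProc gs (st, en, out, keepAcc)).2.2.1) := by
  induction gs with
  | nil => intro keepAcc st en out _; simp [pvProc]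
  | cons g gs ih =>
    intro keepAcc st en out hnd
    rw [List.map_cons, List.foldl_cons]
    by_cases hlen : g.length > 1
    · -- merged group: emits start/end/content, deletes its entries
      obtain ⟨e, g', rfl⟩ : ∃ e g', g = e :: g' := by
        cases g with
        | nil => simp at hlen
        | cons e g' => exact ⟨e, g', rfl⟩
      have hstep : pvAStep (keepAcc ++ (e :: g' ++ gs.flatten), st, en, out) ((e :: g').map Prod.fst) =
          (keepAcc ++ gs.flatten, st ++ [e.1], en ++ [(( e :: g').getLastD (0, "")).1],
           out ++ [(e :: g').foldl (fun c x => c ++ " " ++ x.2) ""]) := by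
        unfold pvAStep
        rw [if_pos (by simpa using hlen)]
        have hinner := pvInner_fold (e :: g') keepAcc gs.flatten ""
          (by rw [show keepAcc ++ (e :: g') ++ gs.flatten = keepAcc ++ ((e :: g') ++ gs.flatten) by simp]
              simpa using hnd)
        rw [show keepAcc ++ (e :: g') ++ gs.flatten = keepAcc ++ (e :: g' ++ gs.flatten) by simp] at hinner
        rw [hinner]
        have hlast : (e.1 :: g'.map Prod.fst).getLast?.getD 0 = (((e :: g').getLast?).getD (0, "")).1 := by
          rw [show e.1 :: g'.map Prod.fst = (e :: g').map Prod.fst from rfl, List.getLast?_map]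
          cases h : (e :: g').getLast? with
          | none => simp at h
          | some v => simp
        simp [hlast]
      have harr2 : keepAcc ++ ((e :: g') :: gs).flatten = keepAcc ++ (e :: g' ++ gs.flatten) := by simp
      rw [harr2, hstep]
      have hnd' : ((keepAcc ++ gs.flatten).map Prod.fst).Nodup := by
        have hsub : List.Sublist (keepAcc ++ gs.flatten) (keepAcc ++ ((e :: g') :: gs).flatten) := by
          simp only [List.flatten_cons]
          exact List.Sublist.append (List.Sublist.refl keepAcc)
            (List.sublist_append_right _ _)
        exact List.Nodup.sublist (hsub.map Prod.fst) hnd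
      rw [ih keepAcc (st ++ [e.1]) (en ++ [((e :: g').getLastD (0, "")).1])
            (out ++ [(e :: g').foldl (fun c x => c ++ " " ++ x.2) ""]) hnd']
      have hproc : pvProc ((e :: g') :: gs) (st, en, out, keepAcc) =
          pvProc gs (st ++ [e.1], en ++ [((e :: g').getLastD (0, "")).1],
            out ++ [(e :: g').foldl (fun c x => c ++ " " ++ x.2) ""], keepAcc) := by
        simp only [pvProc, List.foldl_cons, pvFlush, if_pos hlen]
        simp
      rw [hproc]
    · -- untouched group of length ≤ 1: A leaves state unchanged, B keeps it
      have hstep0 : pvAStep (keepAcc ++ (g :: gs).flatten, st, en, out) (g.map Prod.fst) =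
          (keepAcc ++ (g :: gs).flatten, st, en, out) := by
        unfold pvAStep
        rw [if_neg (by simpa using hlen)]
      rw [hstep0]
      have harr : keepAcc ++ (g :: gs).flatten = (keepAcc ++ g) ++ gs.flatten := by simp
      rw [harr]
      rw [ih (keepAcc ++ g) st en out (by rw [← harr]; exact hnd)]
      have hproc : pvProc (g :: gs) (st, en, out, keepAcc) =
          pvProc gs (st, en, out, keepAcc ++ g) := by
        simp only [pvProc, List.foldl_cons, pvFlush, if_neg hlen]
      rw [hproc]

-- B's walk, with a nonempty pending run, closes the run it extends and continues
theorem pvWalk_run (l : List (Int × String)) :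
    ∀ (run : List (Int × String)) (st en : List Int) (out : List String)
      (keep : List (Int × String)), run ≠ [] →
    pvWalk l run st en out keep =
      pvProc (pvGroupRunsE (pvTakeRunE (run.getLast?.getD (0, "")).1 l).2)
        (pvFlush (run ++ (pvTakeRunE (run.getLast?.getD (0, "")).1 l).1) st en out keep) := by
  induction l with
  | nil =>
    intro run st en out keep _
    simp [pvWalk, pvTakeRunE, pvGroupRunsE, pvProc]
  | cons e rest ih =>
    intro run st en out keep hrun
    have hne : run.isEmpty = false := by simpa [List.isEmpty_iff] using hrun
    by_cases hc : e.1 = (run.getLast?.getD (0, "")).1 + 1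
    · rw [pvWalk, if_pos (by simp [hne, hc])]
      rw [ih (run ++ [e]) st en out keep (by simp)]
      have hlast : ((run ++ [e]).getLast?.getD (0, "")) = e := by simp
      rw [hlast]
      simp only [pvTakeRunE, if_pos hc]
      simp
    · rw [pvWalk, if_neg (by simp [hne, hc])]
      rw [ih [e] _ _ _ _ (by simp)]
      simp only [pvTakeRunE, if_neg hc]
      have hG : pvGroupRunsE (e :: rest) =
          (e :: (pvTakeRunE e.1 rest).1) :: pvGroupRunsE (pvTakeRunE e.1 rest).2 := by
        rw [pvGroupRunsE]
      rw [hG]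
      simp only [pvProc, List.foldl_cons]
      simp

theorem pvWalk_nil_run (l : List (Int × String)) :
    pvWalk l [] [] [] [] [] = pvProc (pvGroupRunsE l) ([], [], [], []) := by
  cases l with
  | nil => simp [pvWalk, pvFlush, pvGroupRunsE, pvProc]
  | cons e rest =>
    rw [pvWalk, if_neg (by simp)]
    have hf : pvFlush [] ([] : List Int) [] [] [] = ([], [], [], []) := by
      simp [pvFlush]
    rw [hf]
    rw [pvWalk_run rest [e] [] [] [] [] (by simp)]
    have hG : pvGroupRunsE (e :: rest) =
        (e :: (pvTakeRunE e.1 rest).1) :: pvGroupRunsE (pvTakeRunE e.1 rest).2 := by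
      rw [pvGroupRunsE]
    rw [hG]
    simp [pvProc]

-- ===== VERDICT (by name: the statement is the Claim_ definition above) =====
theorem contSingleLines_spec : Claim_equal_contSingleLines := by
  intro data _ hpre
  obtain ⟨hne, hnodup⟩ := hpre
  unfold Spec_contSingleLines contSingleLines contSingleLines_alt
  simp only []
  rw [pvGroupRuns_map data.headI]
  have hA := pvAFold (pvGroupRunsE data.headI) [] [] [] []
    (by rw [List.nil_append, pvGroupRunsE_flatten]; exact hnodup)
  rw [List.nil_append, pvGroupRunsE_flatten] at hA
  rw [hA, pvWalk_nil_run data.headI]
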